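-- pv_equiv track=rewrite | github.com/sujitpal/nltk-examples | src/stlclust/extract_stl.py | find_first
-- ===== SOURCE A (Python) =====
-- import string
--
-- PUNCTUATIONS = set([c for c in string.punctuation])
--
-- def find_first(line, cs):
--     idxs = []
--     for c in cs:
--         c_index = line.find(c)
--         if c_index > -1:
--             # if this occurs after an existing punctuation, then discard
--             prev_chars = set([pc for pc in line[0:c_index - 1]])
--             if len(PUNCTUATIONS.intersection(prev_chars)) > 0:
--                 return -1
--             # make sure this position is either EOL or followed by space
--             if c_index + 1 == len(line) or line[c_index + 1] == ' ':
--                 idxs.append(c_index)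
--     if len(idxs) == 0:
--         return -1
--     else:
--         return min(idxs)
-- ===== SOURCE B (Python) =====
-- import string
--
-- PUNCTUATIONS = set(string.punctuation)
--
--
-- def find_first(line, cs):
--     # One pass finds the first punctuation position; each candidate is then
--     # judged by an index comparison, keeping a running minimum of the hits.
--     first_punct = next((j for j, ch in enumerate(line) if ch in PUNCTUATIONS), None)
--     best = -1
--     for c in cs:
--         i = line.find(c)
--         if i < 0:
--             continue
--         if first_punct is not None and first_punct < i:
--             # the candidate occurs after a punctuation character: discard
--             return -1
--         if i + 1 == len(line) or line[i + 1] == ' ':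
--             if best < 0 or i < best:
--                 best = i
--     return best
-- ===== Notes on version B (the rewrite author's own statement) =====
-- stated objective: faster
-- what changed: Instead of building a character set of a prefix slice and intersecting it with the punctuation set for every candidate, B precomputes the first punctuation index of the line once and compares indices, and keeps a running minimum instead of collecting a list and calling min at the end.
-- intended difference: On inputs where A's off-by-one prefix slice line[0:c_index-1] misjudges whether punctuation precedes a candidate (it ignores punctuation immediately before the candidate, and for a candidate at index 0 the slice wraps to the whole line minus its last character), A's discard decision flips relative to the stated intent, so exactly one of the two returns -1 while the other returns the minimum valid position; B's test 'some punctuation occurs anywhere before the candidate' is the intended one, matching A's own comment 'if this occurs after an existing punctuation, then discard'. — e.g. on find_first(".a", ["a"]): A returns 1, B returns -1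
import Mathlib
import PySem

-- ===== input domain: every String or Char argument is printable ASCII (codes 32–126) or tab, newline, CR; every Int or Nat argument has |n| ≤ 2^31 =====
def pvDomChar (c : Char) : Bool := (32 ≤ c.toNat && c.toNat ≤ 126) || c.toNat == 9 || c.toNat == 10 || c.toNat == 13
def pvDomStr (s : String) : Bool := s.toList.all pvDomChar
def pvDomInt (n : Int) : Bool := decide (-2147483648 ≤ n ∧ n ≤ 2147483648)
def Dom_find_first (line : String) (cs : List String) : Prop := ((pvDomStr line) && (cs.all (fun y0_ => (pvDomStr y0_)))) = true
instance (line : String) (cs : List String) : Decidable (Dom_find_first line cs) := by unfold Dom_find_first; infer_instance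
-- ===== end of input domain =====

-- B replaces A's per-candidate prefix-set build and set intersection by one precomputed
-- first-punctuation index plus an index comparison and a running minimum (objective: faster);
-- on the off-by-one inputs described at D_ below, B returns the intended value.

-- ===== PORT A =====
def pyPunctuation : List Char := "!\"#$%&'()*+,-./:;<=>?@[\\]^_`{|}~".toList

def PUNCTUATIONS : PySem.Set Char := PySem.Set.ofList pyPunctuation

def find_first_go (line : List Char) (cs : List String) (idxs : List Int) : Int :=
  match cs with
  | [] =>
    if idxs.length = 0 then -1
    else
      match PySem.List.min? idxs (fun x => x) with
      | some m => m
      | none => -1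
  | c :: rest =>
    let i := PySem.Chars.find line c.toList
    if i > -1 then
      let prevChars : PySem.Set Char :=
        PySem.Set.ofList (PySem.List.slice line (some 0) (some (i - 1)))
      if PySem.Set.len (PySem.Set.inter PUNCTUATIONS prevChars) > 0 then -1
      else if i + 1 = (line.length : Int) ∨ PySem.List.pyGet? line (i + 1) = some ' ' then
        find_first_go line rest (idxs ++ [i])
      else find_first_go line rest idxs
    else find_first_go line rest idxs

def find_first (line : String) (cs : List String) : Int :=
  find_first_go line.toList cs []

-- ===== PORT B =====
def isPunctB (c : Char) : Bool := pyPunctuation.contains c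

-- next((j for j, ch in enumerate(line) if ch in PUNCTUATIONS), None)
def firstPunct : List Char → Nat → Option Nat
  | [], _ => none
  | ch :: rest, j => if isPunctB ch then some j else firstPunct rest (j + 1)

def find_first_alt_go (line : List Char) (n : Int) (fp : Option Nat)
    (cs : List String) (best : Int) : Int :=
  match cs with
  | [] => best
  | c :: rest =>
    let i := PySem.Chars.find line c.toList
    if i < 0 then find_first_alt_go line n fp rest best
    else if (match fp with | some f => decide ((f : Int) < i) | none => false) then -1
    else if i + 1 = n ∨ PySem.List.pyGet? line (i + 1) = some ' ' then
      find_first_alt_go line n fp rest (if best < 0 ∨ i < best then i else best)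
    else find_first_alt_go line n fp rest best

def find_first_alt (line : String) (cs : List String) : Int :=
  find_first_alt_go line.toList (line.toList.length : Int) (firstPunct line.toList 0) cs (-1)

-- ===== PRECONDITION & SPEC =====
-- Pre_ excludes exactly the inputs where Python A raises IndexError (line[1] on an
-- empty line, reached when line == '' and '' is among cs); B raises there too.
def Pre_find_first (line : String) (cs : List String) : Prop :=
  ¬ (line = "" ∧ "" ∈ cs)
instance (line : String) (cs : List String) : Decidable (Pre_find_first line cs) := by
  unfold Pre_find_first; infer_instance

def pvWitness_find_first : String × List String := ("ab c", ["b", "c"])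

-- Helpers for the change region D_, conditions on the input only:
-- dP: position of the first punctuation character of line (= length if none);
-- dF: position of the first occurrence of c in line (-1 if none);
-- dW: c is found and its occurrence ends the line or is followed by a space.
def dP (line : String) : Int := (line.toList.findIdx PUNCTUATIONS.contains : Int)
def dF (line c : String) : Int := PySem.Str.find line c
-- dA: A discards the line because of candidate c; dB: B discards it because of c.
def dA (line c : String) : Bool :=
  decide (dP line + 1 < if dF line c = 0 then (line.length : Int) else dF line c)
def dB (line c : String) : Bool := decide (dP line < dF line c)
def dW (line c : String) : Bool :=
  decide (0 ≤ dF line c ∧ PySem.List.pyGetD line.toList (dF line c + 1) ' ' = ' ')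

-- On inputs where A's off-by-one prefix slice line[0:c_index-1] misjudges whether punctuation
-- precedes a candidate (punctuation immediately before the candidate is ignored; for a candidate
-- at index 0 the slice wraps to the whole line minus its last character), exactly one of the two
-- programs discards the line: that one returns -1 and the other returns the minimum valid
-- position; B's "punctuation anywhere before the candidate" test is the intended one, matching
-- A's own comment "if this occurs after an existing punctuation, then discard".
def D_find_first (line : String) (cs : List String) : Prop :=
  cs.any (dA line) ≠ cs.any (dB line) ∧ cs.any (dW line)
instance (line : String) (cs : List String) : Decidable (D_find_first line cs) := by
  unfold D_find_first; infer_instance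

def Spec_find_first (line : String) (cs : List String) (out : Int) : Prop :=
  ¬ D_find_first line cs → out = find_first_alt line cs
instance (line : String) (cs : List String) (out : Int) : Decidable (Spec_find_first line cs out) := by
  unfold Spec_find_first; infer_instance

def pvDiffWitness_find_first : String × List String := (".a", ["a"])
def pvDiffWitnessOut_find_first : Int × Int := (1, -1)

-- ===== CLAIM (what is proved, stated in full; the proofs are below) =====
def Claim_unchanged_find_first : Prop :=
  ∀ (line : String) (cs : List String), Dom_find_first line cs → Pre_find_first line cs →
    Spec_find_first line cs (find_first line cs)
def Claim_changed_find_first : Prop :=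
  Dom_find_first (pvDiffWitness_find_first.1) (pvDiffWitness_find_first.2) ∧
  Pre_find_first (pvDiffWitness_find_first.1) (pvDiffWitness_find_first.2) ∧
  D_find_first (pvDiffWitness_find_first.1) (pvDiffWitness_find_first.2) ∧
  find_first (pvDiffWitness_find_first.1) (pvDiffWitness_find_first.2) = pvDiffWitnessOut_find_first.1 ∧
  find_first_alt (pvDiffWitness_find_first.1) (pvDiffWitness_find_first.2) = pvDiffWitnessOut_find_first.2 ∧
  pvDiffWitnessOut_find_first.1 ≠ pvDiffWitnessOut_find_first.2
def Claim_exact_find_first : Prop :=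
  ∀ (line : String) (cs : List String), Dom_find_first line cs → Pre_find_first line cs →
    D_find_first line cs → find_first line cs ≠ find_first_alt line cs

-- ===== LEMMAS AND PROOFS =====

-- Proof-side Bool forms of the trigger/valid conditions, phrased on the ports' find:
def bFind (line : List Char) (c : String) : Int := PySem.Chars.find line c.toList
def bTrigA (line : List Char) (c : String) : Bool :=
  (bFind line c > -1) &&
    (match firstPunct line 0 with
     | some f => decide ((f : Int) <
         (if bFind line c = 0 then (line.length : Int) - 1 else bFind line c - 1))
     | none => false)
def bTrigB (line : List Char) (c : String) : Bool :=
  (bFind line c > -1) &&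
    (match firstPunct line 0 with | some f => decide ((f : Int) < bFind line c) | none => false)
def bValid (line : List Char) (c : String) : Bool :=
  (bFind line c > -1) &&
    (decide (bFind line c + 1 = (line.length : Int)) ||
     decide (PySem.List.pyGet? line (bFind line c + 1) = some ' '))


-- firstPunct returns an index at or after its start offset
theorem firstPunct_ge (xs : List Char) (j f : Nat) (h : firstPunct xs j = some f) : j ≤ f := by
  induction xs generalizing j with
  | nil => simp [firstPunct] at h
  | cons ch rest ih =>
    simp only [firstPunct] at h
    split at h
    · injection h with h; omega
    · have := ih (j + 1) h; omega

-- firstPunct returns an index before start + length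
theorem firstPunct_lt_len (xs : List Char) (j f : Nat) (h : firstPunct xs j = some f) :
    f < j + xs.length := by
  induction xs generalizing j with
  | nil => simp [firstPunct] at h
  | cons ch rest ih =>
    simp only [firstPunct] at h
    split at h
    · injection h with h; simp; omega
    · have := ih (j + 1) h; simp; omega

-- firstPunct = none means no punctuation character occurs at all
theorem firstPunct_none (xs : List Char) (j : Nat) (h : firstPunct xs j = none) :
    ∀ c ∈ xs, isPunctB c = false := by
  induction xs generalizing j with
  | nil => simp
  | cons ch rest ih =>
    simp only [firstPunct] at h
    split at h
    · exact absurd h (by simp)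
    · intro c hc
      rcases List.mem_cons.mp hc with rfl | hc
      · simpa using ‹¬ isPunctB c = true›
      · exact ih (j + 1) h c hc

-- the first-punctuation index lies in the first k characters iff some punctuation does
theorem firstPunct_lt_iff (xs : List Char) (j k : Nat) :
    (∃ f, firstPunct xs j = some f ∧ f < j + k) ↔ (xs.take k).any isPunctB = true := by
  induction xs generalizing j k with
  | nil => simp [firstPunct]
  | cons ch rest ih =>
    cases k with
    | zero =>
      simp only [List.take_zero, List.any_nil]
      constructor
      · rintro ⟨f, hf, hlt⟩
        exact absurd (firstPunct_ge _ _ _ hf) (by omega)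
      · intro h; exact absurd h (by simp)
    | succ k =>
      simp only [firstPunct, List.take_succ_cons, List.any_cons]
      by_cases hp : isPunctB ch = true
      · simp only [hp, Bool.true_or]
        exact iff_of_true ⟨j, rfl, by omega⟩ (by trivial)
      · simp only [hp, Bool.false_or]
        rw [← ih (j + 1) k]
        constructor
        · rintro ⟨f, hf, hlt⟩; exact ⟨f, hf, by omega⟩
        · rintro ⟨f, hf, hlt⟩; exact ⟨f, hf, by omega⟩

-- A's "some punctuation occurs in the prefix" test, as an any over the prefix
theorem setLen_pos_iff (prev : List Char) :
    (0 < PySem.Set.len (PySem.Set.inter PUNCTUATIONS (PySem.Set.ofList prev))) ↔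
      prev.any isPunctB = true := by
  simp only [PySem.Set.len, PySem.Set.inter, PUNCTUATIONS, List.any_eq_true, isPunctB]
  rw [Int.natCast_pos, List.length_pos_iff, List.ne_nil_iff_exists_cons]
  constructor
  · rintro ⟨c, l, hcl⟩
    have hc : c ∈ List.filter (fun x => (PySem.Set.ofList prev).contains x)
        (PySem.Set.ofList pyPunctuation) := by rw [hcl]; simp
    rw [List.mem_filter] at hc
    obtain ⟨hmem, hcont⟩ := hc
    refine ⟨c, ?_, ?_⟩
    · have := (PySem.Set.mem_ofList prev c).mp (by simpa [PySem.Set.contains, List.contains_iff_mem] using hcont)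
      exact this
    · simpa [List.contains_iff_mem] using (PySem.Set.mem_ofList pyPunctuation c).mp hmem
  · rintro ⟨c, hcprev, hcp⟩
    have hmem : c ∈ List.filter (fun x => (PySem.Set.ofList prev).contains x)
        (PySem.Set.ofList pyPunctuation) := by
      rw [List.mem_filter]
      refine ⟨(PySem.Set.mem_ofList pyPunctuation c).mpr (by simpa [List.contains_iff_mem] using hcp), ?_⟩
      simpa [PySem.Set.contains, List.contains_iff_mem] using (PySem.Set.mem_ofList prev c).mpr hcprev
    exact List.ne_nil_iff_exists_cons.mp (List.ne_nil_of_mem hmem)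

-- A's prefix slice line[0:i-1] as a take
theorem prev_eq_take (line : List Char) (i : Int) (h0 : 0 ≤ i) :
    PySem.List.slice line (some 0) (some (i - 1)) =
      line.take (if i = 0 then line.length - 1 else (i - 1).toNat) := by
  by_cases hi : i = 0
  · subst hi
    rw [PySem.List.slice_zero_start]
    simpa [List.dropLast_eq_take] using PySem.List.slice_to_neg_one (xs := line)
  · rw [PySem.List.slice_zero_start, PySem.List.slice_to line (show (0:Int) ≤ i - 1 by omega)]
    simp [hi]

-- the two punctuation tests agree
theorem punct_iff (line : List Char) (i : Int) (h0 : 0 ≤ i) :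
    (0 < PySem.Set.len (PySem.Set.inter PUNCTUATIONS
        (PySem.Set.ofList (PySem.List.slice line (some 0) (some (i - 1)))))) ↔
      ((match firstPunct line 0 with
        | some f => decide ((f : Int) < (if i = 0 then (line.length : Int) - 1 else i - 1))
        | none => false) = true) := by
  rw [setLen_pos_iff, prev_eq_take line i h0]
  rcases hfp : firstPunct line 0 with _ | f
  · simp only [List.any_eq_true]
    constructor
    · rintro ⟨c, hc, hp⟩
      exact absurd (firstPunct_none line 0 hfp c (List.mem_of_mem_take hc)) (by simp [hp])
    · simp
  · have h1 := firstPunct_ge line 0 f hfp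
    have h2 := firstPunct_lt_len line 0 f hfp
    rw [← firstPunct_lt_iff line 0 _]
    simp only [hfp, Nat.zero_add, decide_eq_true_eq]
    constructor
    · rintro ⟨f', hf', hlt⟩
      injection hf' with hf'; subst hf'
      by_cases hI : i = 0
      · subst hI; simp at hlt ⊢; omega
      · rw [if_neg hI] at hlt ⊢; omega
    · intro hlt
      refine ⟨f, rfl, ?_⟩
      by_cases hI : i = 0
      · subst hI; simp at hlt ⊢; omega
      · rw [if_neg hI] at hlt ⊢; omega

-- B's running minimum as a fold (proof-side abbreviation)
def runMin (b : Int) (l : List Int) : Int :=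
  l.foldl (fun b i => if b < 0 ∨ i < b then i else b) b

theorem runMin_eq_foldl_min (l : List Int) : ∀ (b : Int), 0 ≤ b → (∀ x ∈ l, 0 ≤ x) →
    runMin b l = l.foldl min b := by
  induction l with
  | nil => intro b _ _; rfl
  | cons i t ih =>
    intro b hb hl
    have hi : 0 ≤ i := hl i (by simp)
    have hstep : (if b < 0 ∨ i < b then i else b) = min b i := by
      rcases le_or_gt b i with h | h
      · rw [min_eq_left h, if_neg (by omega)]
      · rw [min_eq_right (le_of_lt h), if_pos (Or.inr h)]
    simp only [runMin, List.foldl_cons] at *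
    rw [hstep, ih (min b i) (le_min hb hi) (fun x hx => hl x (by simp [hx]))]

theorem foldl_min_nonneg (l : List Int) : ∀ (b : Int), 0 ≤ b → (∀ x ∈ l, 0 ≤ x) →
    0 ≤ l.foldl min b := by
  induction l with
  | nil => intro b hb _; exact hb
  | cons i t ih =>
    intro b hb hl
    exact ih (min b i) (le_min hb (hl i (by simp))) (fun x hx => hl x (by simp [hx]))

-- the "match min? with" tail of A equals B's running minimum, on nonnegative lists
theorem minMatch_eq_runMin (l : List Int) (hl : ∀ x ∈ l, 0 ≤ x) :
    (match PySem.List.min? l (fun x => x) with | some m => m | none => -1) = runMin (-1) l := by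
  cases l with
  | nil => rfl
  | cons v vs =>
    have hv : 0 ≤ v := hl v (by simp)
    rw [PySem.List.min?_id_cons]
    show vs.foldl min v = runMin (if (-1:Int) < 0 ∨ v < -1 then v else -1) vs
    rw [if_pos (Or.inl (by norm_num)),
      runMin_eq_foldl_min vs v hv (fun x hx => hl x (by simp [hx]))]

-- characterization of A's loop
theorem charA (line : List Char) (cs : List String) : ∀ (idxs : List Int),
    find_first_go line cs idxs =
      if cs.any (bTrigA line) then -1
      else match PySem.List.min? (idxs ++ (cs.filter (bValid line)).map (bFind line)) (fun x => x) with
           | some m => m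
           | none => -1 := by
  induction cs with
  | nil =>
    intro idxs
    cases idxs with
    | nil => rfl
    | cons x xs =>
      simp only [find_first_go, List.any_nil, List.filter_nil, List.map_nil,
        List.append_nil, List.length_cons]
      rw [if_neg (by omega), PySem.List.min?_id_cons]
      simp
  | cons c rest ih =>
    intro idxs
    simp only [find_first_go, List.any_cons, List.filter_cons]
    set i := PySem.Chars.find line c.toList with hidef
    have hfc : bFind line c = i := rfl
    by_cases hi : i > -1
    · have h0 : (0:Int) ≤ i := by omega
      rw [if_pos hi]
      by_cases hp : (0:Int) < PySem.Set.len (PySem.Set.inter PUNCTUATIONS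
          (PySem.Set.ofList (PySem.List.slice line (some 0) (some (i - 1)))))
      · have hA : bTrigA line c = true := by
          rw [bTrigA, hfc, (punct_iff line i h0).mp hp]
          simpa using hi
        rw [if_pos hp, hA, Bool.true_or, if_pos rfl]
      · have hA : bTrigA line c = false := by
          rw [bTrigA, hfc]
          by_cases hq : (match firstPunct line 0 with
              | some f => decide ((f : Int) < (if i = 0 then (line.length : Int) - 1 else i - 1))
              | none => false) = true
          · exact absurd ((punct_iff line i h0).mpr hq) hp
          · simp only [Bool.and_eq_false_iff]
            right; simpa using hq
        rw [if_neg hp, hA, Bool.false_or]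
        by_cases hv : i + 1 = (line.length : Int) ∨ PySem.List.pyGet? line (i + 1) = some ' '
        · have hV : bValid line c = true := by
            rw [bValid, hfc]
            simp only [Bool.and_eq_true, Bool.or_eq_true, decide_eq_true_eq]
            exact ⟨by simpa using hi, hv⟩
          rw [if_pos hv, ih (idxs ++ [i]), hV]
          simp only [if_true, List.map_cons, hfc, List.append_assoc, List.singleton_append]
        · have hV : bValid line c = false := by
            rw [bValid, hfc]
            simp only [Bool.and_eq_false_iff, Bool.or_eq_false_iff, decide_eq_false_iff_not]
            right
            push_neg at hv
            exact ⟨hv.1, hv.2⟩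
          rw [if_neg hv, ih idxs, hV]
          simp only [Bool.false_eq_true, if_false]
    · have hA : bTrigA line c = false := by
        rw [bTrigA, hfc]; simp only [Bool.and_eq_false_iff]; left; simpa using hi
      have hV : bValid line c = false := by
        rw [bValid, hfc]; simp only [Bool.and_eq_false_iff]; left; simpa using hi
      rw [if_neg hi, ih idxs, hA, hV, Bool.false_or]
      simp only [Bool.false_eq_true, if_false]

-- characterization of B's loop
theorem charB (line : List Char) (cs : List String) : ∀ (best : Int),
    find_first_alt_go line (line.length : Int) (firstPunct line 0) cs best =
      if cs.any (bTrigB line) then -1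
      else runMin best ((cs.filter (bValid line)).map (bFind line)) := by
  induction cs with
  | nil => intro best; rfl
  | cons c rest ih =>
    intro best
    simp only [find_first_alt_go, List.any_cons, List.filter_cons]
    set i := PySem.Chars.find line c.toList with hidef
    have hfc : bFind line c = i := rfl
    by_cases hneg : i < 0
    · have hB : bTrigB line c = false := by
        rw [bTrigB, hfc]; simp only [Bool.and_eq_false_iff]; left
        simp only [gt_iff_lt, decide_eq_false_iff_not, not_lt]; omega
      have hV : bValid line c = false := by
        rw [bValid, hfc]; simp only [Bool.and_eq_false_iff]; left
        simp only [gt_iff_lt, decide_eq_false_iff_not, not_lt]; omega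
      rw [if_pos hneg, ih best, hB, hV, Bool.false_or]
      simp only [Bool.false_eq_true, if_false]
    · have hgt : i > -1 := by omega
      rw [if_neg hneg]
      by_cases hp : (match firstPunct line 0 with
          | some f => decide ((f : Int) < i) | none => false) = true
      · have hB : bTrigB line c = true := by
          rw [bTrigB, hfc, hp]
          simpa using hgt
        rw [if_pos hp, hB, Bool.true_or, if_pos rfl]
      · have hB : bTrigB line c = false := by
          rw [bTrigB, hfc]
          simp only [Bool.and_eq_false_iff]; right; simpa using hp
        rw [if_neg hp, hB, Bool.false_or]
        by_cases hv : i + 1 = (line.length : Int) ∨ PySem.List.pyGet? line (i + 1) = some ' '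
        · have hV : bValid line c = true := by
            rw [bValid, hfc]
            simp only [Bool.and_eq_true, Bool.or_eq_true, decide_eq_true_eq]
            exact ⟨by simpa using hgt, hv⟩
          rw [if_pos hv, ih _, hV]
          simp only [if_true, List.map_cons, hfc, runMin, List.foldl_cons]
        · have hV : bValid line c = false := by
            rw [bValid, hfc]
            simp only [Bool.and_eq_false_iff, Bool.or_eq_false_iff, decide_eq_false_iff_not]
            right
            push_neg at hv
            exact ⟨hv.1, hv.2⟩
          rw [if_neg hv, ih best, hV]
          simp only [Bool.false_eq_true, if_false]

-- the filtered finds are nonnegative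
theorem vfinds_nonneg (line : List Char) (cs : List String) :
    ∀ x ∈ (cs.filter (bValid line)).map (bFind line), 0 ≤ x := by
  intro x hx
  obtain ⟨c, hc, rfl⟩ := List.mem_map.mp hx
  have := (List.mem_filter.mp hc).2
  rw [bValid, Bool.and_eq_true] at this
  have : bFind line c > -1 := by simpa using this.1
  omega

-- final form of A's output
theorem outA (line : String) (cs : List String) :
    find_first line cs =
      if cs.any (bTrigA line.toList) then -1
      else runMin (-1) ((cs.filter (bValid line.toList)).map (bFind line.toList)) := by
  rw [find_first, charA line.toList cs [], List.nil_append]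
  by_cases h : cs.any (bTrigA line.toList) = true
  · rw [if_pos h, if_pos h]
  · rw [if_neg h, if_neg h, minMatch_eq_runMin _ (vfinds_nonneg line.toList cs)]

-- final form of B's output
theorem outB (line : String) (cs : List String) :
    find_first_alt line cs =
      if cs.any (bTrigB line.toList) then -1
      else runMin (-1) ((cs.filter (bValid line.toList)).map (bFind line.toList)) := by
  rw [find_first_alt, charB line.toList cs (-1)]


-- ===== bridge: the D_ conditions equal the proof-side Bool forms over firstPunct =====
theorem contains_eq (ch : Char) : PUNCTUATIONS.contains ch = isPunctB ch := by
  rw [Bool.eq_iff_iff, isPunctB]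
  constructor
  · intro h
    have : ch ∈ pyPunctuation := (PySem.Set.mem_ofList pyPunctuation ch).mp
      (by simpa [PUNCTUATIONS, PySem.Set.contains, List.contains_iff_mem] using h)
    simpa [List.contains_iff_mem] using this
  · intro h
    have h' : ch ∈ pyPunctuation := by simpa [List.contains_iff_mem] using h
    simpa [PUNCTUATIONS, PySem.Set.contains, List.contains_iff_mem] using
      (PySem.Set.mem_ofList pyPunctuation ch).mpr h'

theorem dP_eq (line : String) : dP line = ((line.toList.findIdx isPunctB : Nat) : Int) := by
  have h : PUNCTUATIONS.contains = isPunctB := funext contains_eq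
  rw [dP, h]

theorem dF_eq (line c : String) : dF line c = PySem.Chars.find line.toList c.toList := by
  rw [dF, PySem.Str.find_eq]

theorem firstPunct_findIdx (xs : List Char) : ∀ j : Nat,
    firstPunct xs j =
      if xs.findIdx isPunctB < xs.length then some (xs.findIdx isPunctB + j) else none := by
  induction xs with
  | nil => intro j; simp [firstPunct]
  | cons a l ih =>
    intro j
    rw [firstPunct, List.findIdx_cons]
    by_cases hp : isPunctB a = true
    · simp [hp]
    · have hp' : isPunctB a = false := by simpa using hp
      rw [if_neg hp, hp', cond_false, ih (j + 1)]
      by_cases hl : l.findIdx isPunctB < l.length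
      · rw [if_pos hl, if_pos (by simp only [List.length_cons]; omega)]
        congr 1
        omega
      · rw [if_neg hl, if_neg (by simp only [List.length_cons]; omega)]

-- the match on firstPunct, as a condition on the first punctuation index
theorem match_fp (L : List Char) (g : Int) :
    (match firstPunct L 0 with | some f => decide ((f : Int) < g) | none => false) = true
      ↔ (L.findIdx isPunctB < L.length ∧ ((L.findIdx isPunctB : Int) < g)) := by
  rw [firstPunct_findIdx L 0]
  by_cases h : L.findIdx isPunctB < L.length
  · rw [if_pos h]; simp [h]
  · rw [if_neg h]; simp [h]

theorem aA_eq (line c : String) : dA line c = bTrigA line.toList c := by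
  rw [dA, bTrigA, bFind, dP_eq, dF_eq, Bool.eq_iff_iff]
  have hq := List.findIdx_le_length (p := isPunctB) (xs := line.toList)
  have hF := PySem.Chars.find_le_length line.toList c.toList
  have hlen : line.toList.length = line.length := String.length_toList
  rw [← hlen]
  simp only [Bool.and_eq_true, decide_eq_true_eq, match_fp, gt_iff_lt]
  by_cases h0 : PySem.Chars.find line.toList c.toList = 0
  · rw [if_pos h0, if_pos h0]; omega
  · rw [if_neg h0, if_neg h0]; omega

theorem aB_eq (line c : String) : dB line c = bTrigB line.toList c := by
  rw [dB, bTrigB, bFind, dP_eq, dF_eq, Bool.eq_iff_iff]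
  have hq := List.findIdx_le_length (p := isPunctB) (xs := line.toList)
  have hF := PySem.Chars.find_le_length line.toList c.toList
  simp only [Bool.and_eq_true, decide_eq_true_eq, match_fp, gt_iff_lt]
  omega

theorem aW_eq (line c : String) (hc : c = "" → line ≠ "") :
    dW line c = bValid line.toList c := by
  rw [dW, bValid, bFind, dF_eq, Bool.eq_iff_iff]
  by_cases h : 0 ≤ PySem.Chars.find line.toList c.toList
  · have hle := PySem.Chars.find_le_length line.toList c.toList
    have hstrict : (PySem.Chars.find line.toList c.toList).toNat + 1 ≤ line.toList.length := by
      by_contra hcon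
      have hEq : (PySem.Chars.find line.toList c.toList).toNat = line.toList.length := by omega
      obtain ⟨hpre, _⟩ := PySem.Chars.find_spec h
      rw [hEq, List.drop_length] at hpre
      have hcl : c.toList = [] := List.prefix_nil.mp hpre
      have hcs : c = "" := by rw [← String.toList_inj]; exact hcl
      have h0 : PySem.Chars.find line.toList c.toList = 0 := by
        rw [hcl]; exact PySem.Chars.find_nil line.toList
      rw [h0] at hEq
      have hnil : line.toList = [] := List.length_eq_zero_iff.mp (by omega)
      exact hc hcs (by rw [← String.toList_inj]; simpa using hnil)
    have hcast : PySem.Chars.find line.toList c.toList + 1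
        = (((PySem.Chars.find line.toList c.toList).toNat + 1 : Nat) : Int) := by omega
    rw [hcast, PySem.List.pyGetD_natCast, PySem.List.pyGet?_natCast, List.getD_eq_getElem?_getD]
    by_cases hn : (PySem.Chars.find line.toList c.toList).toNat + 1 = line.toList.length
    · rw [List.getElem?_eq_none (by omega)]
      simp only [Option.getD_none, Bool.and_eq_true, Bool.or_eq_true, decide_eq_true_eq,
        reduceCtorEq, or_false, gt_iff_lt, eq_self_iff_true, and_true]
      omega
    · have hlt : (PySem.Chars.find line.toList c.toList).toNat + 1 < line.toList.length := by
        omega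
      rw [List.getElem?_eq_getElem hlt]
      simp only [Option.getD_some, Bool.and_eq_true, Bool.or_eq_true, decide_eq_true_eq,
        Option.some.injEq, gt_iff_lt]
      constructor
      · rintro ⟨h1, h2⟩; exact ⟨by omega, Or.inr h2⟩
      · rintro ⟨h1, h2 | h2⟩
        · exact absurd h2 (by omega)
        · exact ⟨by omega, h2⟩
  · have hf : PySem.Chars.find line.toList c.toList = -1 := by
      have := PySem.Chars.neg_one_le_find line.toList c.toList; omega
    simp only [Bool.and_eq_true, decide_eq_true_eq, gt_iff_lt]
    constructor
    · rintro ⟨h1, _⟩; omega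
    · rintro ⟨h1, _⟩; omega

theorem any_congr_mem {α : Type} (l : List α) (p q : α → Bool)
    (h : ∀ a ∈ l, p a = q a) : l.any p = l.any q := by
  induction l with
  | nil => rfl
  | cons x t ih =>
    simp only [List.any_cons, h x (by simp), ih (fun a ha => h a (by simp [ha]))]

theorem anyA_eq (line : String) (cs : List String) :
    cs.any (dA line) = cs.any (bTrigA line.toList) :=
  any_congr_mem cs _ _ (fun c _ => aA_eq line c)
theorem anyB_eq (line : String) (cs : List String) :
    cs.any (dB line) = cs.any (bTrigB line.toList) :=
  any_congr_mem cs _ _ (fun c _ => aB_eq line c)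
theorem anyW_eq (line : String) (cs : List String) (hpre : ¬ (line = "" ∧ "" ∈ cs)) :
    cs.any (dW line) = cs.any (bValid line.toList) :=
  any_congr_mem cs _ _ (fun c hcmem =>
    aW_eq line c (fun hceq hline => hpre ⟨hline, by rw [← hceq]; exact hcmem⟩))

-- ===== VERDICT (by name: the statements are the Claim_ definitions above) =====
theorem find_first_spec : Claim_unchanged_find_first := by
  intro line cs _ hpre hnD
  rw [outA, outB]
  unfold D_find_first at hnD
  rw [anyA_eq, anyB_eq, anyW_eq line cs hpre] at hnD
  by_cases hT : cs.any (bTrigA line.toList) = cs.any (bTrigB line.toList)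
  · rw [hT]
  · have hv : cs.any (bValid line.toList) = false := by
      by_contra hv
      exact hnD ⟨hT, by simpa using hv⟩
    have hnil : cs.filter (bValid line.toList) = [] :=
      List.filter_eq_nil_iff.mpr (fun c hc => by
        have := List.any_eq_false.mp hv c hc; simpa using this)
    rw [hnil]
    simp [runMin]

theorem find_first_changed : Claim_changed_find_first := by
  unfold Claim_changed_find_first; decide

theorem find_first_tight : Claim_exact_find_first := by
  intro line cs _ hpre hD
  unfold D_find_first at hD
  rw [anyA_eq, anyB_eq, anyW_eq line cs hpre] at hD
  obtain ⟨hT, hv⟩ := hD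
  have hv : cs.any (bValid line.toList) = true := hv
  rw [outA, outB]
  obtain ⟨c, hc, hcv⟩ := List.any_eq_true.mp hv
  have hmem : bFind line.toList c ∈ (cs.filter (bValid line.toList)).map (bFind line.toList) :=
    List.mem_map_of_mem (List.mem_filter.mpr ⟨hc, hcv⟩)
  have hpos : 0 ≤ runMin (-1) ((cs.filter (bValid line.toList)).map (bFind line.toList)) := by
    rcases hl : (cs.filter (bValid line.toList)).map (bFind line.toList) with _ | ⟨v, vs⟩
    · rw [hl] at hmem; simp at hmem
    · have hall := vfinds_nonneg line.toList cs
      rw [hl] at hall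
      have hv0 : 0 ≤ v := hall v (by simp)
      show 0 ≤ runMin (if (-1:Int) < 0 ∨ v < -1 then v else -1) vs
      rw [if_pos (Or.inl (by norm_num)),
        runMin_eq_foldl_min vs v hv0 (fun x hx => hall x (by simp [hx]))]
      exact foldl_min_nonneg vs v hv0 (fun x hx => hall x (by simp [hx]))
  cases hA : cs.any (bTrigA line.toList) <;> cases hB : cs.any (bTrigB line.toList)
  · rw [hA, hB] at hT; exact absurd rfl hT
  · rw [if_neg (by simp), if_pos rfl]; omega
  · rw [if_pos rfl, if_neg (by simp)]; omega
  · rw [hA, hB] at hT; exact absurd rfl hT
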